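-- pv_equiv track=rewrite | github.com/d4nbrn/To-do-List-Team-Project | viewContents.py | viewContents
-- ===== SOURCE A (Python) =====
-- def viewContents(toDoList):
--     # List should be in format [["task"][3 <--- PRIORITY]]
--     # Using concatenation there should a way to make one string that holds each of the list elements for output
--     # 3 for loops that is the size of the list should allow the elements to be displayed by priority level
--     displayList = ""
--     for i in range(len(toDoList)):
--         if toDoList[i][1] == 3:
--             displayList = displayList + toDoList[i][0] + " "
--     for i in range(len(toDoList)):
--         if toDoList[i][1] == 2:
--             displayList = displayList + toDoList[i][0] + " "
--     for i in range(len(toDoList)):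
--         if toDoList[i][1] == 1:
--             displayList = displayList + toDoList[i][0] + " "
--     return displayList
-- ===== SOURCE B (Python) =====
-- def viewContents(toDoList):
--     bucket3, bucket2, bucket1 = [], [], []
--     for elem in toDoList:
--         if elem[1] == 3:
--             bucket3.append(elem)
--         elif elem[1] == 2:
--             bucket2.append(elem)
--         elif elem[1] == 1:
--             bucket1.append(elem)
--     displayList = ""
--     for elem in bucket3 + bucket2 + bucket1:
--         displayList = displayList + elem[0] + " "
--     return displayList
-- ===== Notes on version B (the rewrite author's own statement) =====
-- stated objective: simpler
-- what changed: Replaces three full scans of the list (one per priority) by a single bucketing pass into three lists followed by one concatenation pass over bucket3++bucket2++bucket1.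
import Mathlib
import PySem

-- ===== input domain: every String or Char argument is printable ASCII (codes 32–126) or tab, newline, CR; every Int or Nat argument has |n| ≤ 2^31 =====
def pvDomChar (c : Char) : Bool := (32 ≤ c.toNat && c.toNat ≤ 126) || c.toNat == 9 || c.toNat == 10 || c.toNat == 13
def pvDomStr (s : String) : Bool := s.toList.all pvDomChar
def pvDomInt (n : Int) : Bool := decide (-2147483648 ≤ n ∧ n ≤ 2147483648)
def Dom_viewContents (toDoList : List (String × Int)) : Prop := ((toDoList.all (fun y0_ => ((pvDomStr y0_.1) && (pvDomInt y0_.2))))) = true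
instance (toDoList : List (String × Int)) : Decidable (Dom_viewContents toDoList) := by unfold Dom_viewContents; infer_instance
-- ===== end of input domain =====

-- B replaces A's three full scans (one per priority) by a single bucketing pass plus one
-- concatenation pass; objective: simpler decomposition, identical return value.

-- ===== PORT A =====
-- three loops over the whole list, one per priority, concatenating "name "
def viewContents (toDoList : List (String × Int)) : String :=
  let d1 := toDoList.foldl (fun s e => if e.2 = 3 then s ++ e.1 ++ " " else s) ""
  let d2 := toDoList.foldl (fun s e => if e.2 = 2 then s ++ e.1 ++ " " else s) d1
  toDoList.foldl (fun s e => if e.2 = 1 then s ++ e.1 ++ " " else s) d2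

-- ===== PORT B =====
-- one pass sorting each element into its priority bucket (others dropped)
def pvBucketStep (acc : List (String × Int) × List (String × Int) × List (String × Int))
    (e : String × Int) : List (String × Int) × List (String × Int) × List (String × Int) :=
  if e.2 = 3 then (acc.1 ++ [e], acc.2.1, acc.2.2)
  else if e.2 = 2 then (acc.1, acc.2.1 ++ [e], acc.2.2)
  else if e.2 = 1 then (acc.1, acc.2.1, acc.2.2 ++ [e])
  else acc

def viewContents_alt (toDoList : List (String × Int)) : String :=
  let b := toDoList.foldl pvBucketStep ([], [], [])
  (b.1 ++ b.2.1 ++ b.2.2).foldl (fun s e => s ++ e.1 ++ " ") ""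

-- ===== PRECONDITION & SPEC =====
def Spec_viewContents (toDoList : List (String × Int)) (out : String) : Prop := out = viewContents_alt toDoList
instance (toDoList : List (String × Int)) (out : String) : Decidable (Spec_viewContents toDoList out) := by unfold Spec_viewContents; infer_instance

-- ===== CLAIM (what is proved, stated in full; the proofs are below) =====
def Claim_equal_viewContents : Prop := ∀ (toDoList : List (String × Int)), Dom_viewContents toDoList → Spec_viewContents toDoList (viewContents toDoList)

-- ===== LEMMAS AND PROOFS =====

-- A's guarded loop for priority p is the plain concatenation loop over the p-filter
theorem pv_foldl_filter (p : Int) (l : List (String × Int)) (s : String) :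
    l.foldl (fun s e => if e.2 = p then s ++ e.1 ++ " " else s) s
      = (l.filter (fun e => e.2 == p)).foldl (fun s e => s ++ e.1 ++ " ") s := by
  induction l generalizing s with
  | nil => rfl
  | cons h t ih =>
    have hb : ∀ q : Int, (h.2 == q) = decide (h.2 = q) := fun q => rfl
    by_cases hp : h.2 = p
    · simp [List.foldl, List.filter_cons, hb, hp, ih]
    · simp [List.foldl, List.filter_cons, hb, hp, ih]

-- B's bucketing pass computes the three filters (appended after any initial buckets)
theorem pv_buckets (l : List (String × Int))
    (b3 b2 b1 : List (String × Int)) :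
    l.foldl pvBucketStep (b3, b2, b1)
      = (b3 ++ l.filter (fun e => e.2 == 3),
         b2 ++ l.filter (fun e => e.2 == 2),
         b1 ++ l.filter (fun e => e.2 == 1)) := by
  induction l generalizing b3 b2 b1 with
  | nil => simp
  | cons h t ih =>
    have hb : ∀ q : Int, (h.2 == q) = decide (h.2 = q) := fun q => rfl
    by_cases h3 : h.2 = 3
    · simp [List.foldl, pvBucketStep, List.filter_cons, hb, h3, ih]
    · by_cases h2 : h.2 = 2
      · simp [List.foldl, pvBucketStep, List.filter_cons, hb, h3, h2, ih]
      · by_cases h1 : h.2 = 1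
        · simp [List.foldl, pvBucketStep, List.filter_cons, hb, h3, h2, h1, ih]
        · simp [List.foldl, pvBucketStep, List.filter_cons, hb, h3, h2, h1, ih]

-- ===== VERDICT (by name: the statement is the Claim_ definition above) =====
theorem viewContents_spec : Claim_equal_viewContents := by
  intro l _
  unfold Spec_viewContents viewContents viewContents_alt
  simp only [pv_buckets l [] [] [], List.nil_append, List.foldl_append,
    pv_foldl_filter 3, pv_foldl_filter 2, pv_foldl_filter 1]
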